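-- pv_equiv track=rewrite | github.com/mariotv3/Scalable_Duplicate_Detection_MSMPplusplus | src/lsh/lsh.py | factor_pairs
-- ===== SOURCE A (Python) =====
-- def factor_pairs(n: int):
--     pairs = []
--     for b in range(1, int(n**0.5) + 1):
--         if n % b == 0:
--             r = n // b
--             pairs.append((b, r))
--             if b != r:
--                 pairs.append((r, b))
--     return sorted(pairs)
-- ===== SOURCE B (Python) =====
-- def factor_pairs(n: int):
--     # Different algorithm: factor n into prime powers, generate every divisor as a
--     # product of prime powers, then emit (d, n // d) over the sorted divisors.
--     if n == 0:
--         return []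
--     divisors = [1]
--     m = n
--     p = 2
--     while p * p <= m:
--         if m % p == 0:
--             powers = [1]
--             pk = 1
--             while m % p == 0:
--                 m //= p
--                 pk *= p
--                 powers.append(pk)
--             divisors = [d * q for d in divisors for q in powers]
--         p += 1
--     if m > 1:
--         divisors = [d * q for d in divisors for q in (1, m)]
--     divisors.sort()
--     return [(d, n // d) for d in divisors]
-- ===== Notes on version B (the rewrite author's own statement) =====
-- stated objective: alternative
-- what changed: B replaces A's trial division over every candidate up to sqrt(n) with prime factorization: it extracts each prime power of n, builds all divisors as products of the prime powers, sorts the divisors once and maps each divisor d to (d, n//d).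
import Mathlib
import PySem

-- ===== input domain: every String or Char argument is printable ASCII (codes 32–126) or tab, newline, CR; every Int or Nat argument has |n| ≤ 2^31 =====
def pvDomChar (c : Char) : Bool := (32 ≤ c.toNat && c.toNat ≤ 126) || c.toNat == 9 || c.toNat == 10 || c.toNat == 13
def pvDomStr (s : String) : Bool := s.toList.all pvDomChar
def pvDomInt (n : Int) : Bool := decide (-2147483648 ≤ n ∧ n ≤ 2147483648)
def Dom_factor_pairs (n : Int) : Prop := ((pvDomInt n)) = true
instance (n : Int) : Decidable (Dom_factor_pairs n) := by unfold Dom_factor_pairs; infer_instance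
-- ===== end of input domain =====

-- B computes the pairs by a different algorithm: it factors n into prime powers, builds every
-- divisor as a product of prime powers and maps the sorted divisors to (d, n // d); alternative, not faster.

-- ===== PORT A =====
-- int(n**0.5) is the exact floor square root for every 0 ≤ n ≤ 2^31; ported as Nat.sqrt.
-- Negative n raises TypeError in Python (complex power), excluded by Pre_.
def factor_pairs (n : Int) : List (Int × Int) :=
  let pairs : List (Int × Int) :=
    (PySem.List.pyRange 1 ((Nat.sqrt n.toNat : Int) + 1) 1).foldl
      (fun pairs b =>
        if PySem.Int.mod n b = 0 then
          let r := PySem.Int.floordiv n b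
          let pairs := pairs ++ [(b, r)]
          if b ≠ r then pairs ++ [(r, b)] else pairs
        else pairs) []
  PySem.List.sorted2 pairs (fun p => p.1) (fun p => p.2)

-- ===== PORT B =====
-- inner 'while m % p == 0' of Source B; the fuel only makes the recursion total (m // p needs m > 0
-- to shrink), it is never exhausted on the inputs the outer loop feeds it
def pvExtract (fuel : Nat) (m p pk : Int) (powers : List Int) : Int × Int × List Int :=
  match fuel with
  | 0 => (m, pk, powers)
  | f + 1 =>
    if PySem.Int.mod m p = 0 then
      pvExtract f (PySem.Int.floordiv m p) p (pk * p) (powers ++ [pk * p])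
    else (m, pk, powers)

-- outer 'while p * p <= m' of Source B, fueled the same way
def pvOuter (fuel : Nat) (m p : Int) (divisors : List Int) : Int × List Int :=
  match fuel with
  | 0 => (m, divisors)
  | f + 1 =>
    if p * p ≤ m then
      if PySem.Int.mod m p = 0 then
        let r := pvExtract m.toNat m p 1 [1]
        pvOuter f r.1 (p + 1) (divisors.flatMap fun d => r.2.2.map fun q => d * q)
      else pvOuter f m (p + 1) divisors
    else (m, divisors)

def factor_pairs_alt (n : Int) : List (Int × Int) :=
  if n = 0 then []
  else
    let res := pvOuter n.toNat n 2 [1]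
    let divisors :=
      if 1 < res.1 then res.2.flatMap fun d => ([(1 : Int), res.1]).map fun q => d * q
      else res.2
    (PySem.List.sorted divisors (fun d => d)).map fun d => (d, PySem.Int.floordiv n d)

-- ===== PRECONDITION & SPEC =====
-- Pre_ excludes exactly the negative n, on which Python's n**0.5 is complex and int() raises TypeError.
def Pre_factor_pairs (n : Int) : Prop := 0 ≤ n
instance (n : Int) : Decidable (Pre_factor_pairs n) := by unfold Pre_factor_pairs; infer_instance
def pvWitness_factor_pairs : Int := (36)

def Spec_factor_pairs (n : Int) (out : List (Int × Int)) : Prop := out = factor_pairs_alt n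
instance (n : Int) (out : List (Int × Int)) : Decidable (Spec_factor_pairs n out) := by unfold Spec_factor_pairs; infer_instance

-- ===== CLAIM (what is proved, stated in full; the proofs are below) =====
def Claim_equal_factor_pairs : Prop := ∀ (n : Int), Dom_factor_pairs n → Pre_factor_pairs n → Spec_factor_pairs n (factor_pairs n)

-- ===== LEMMAS AND PROOFS =====

-- square-root bound, small-divisor list, cofactor (A-side vocabulary)
def pvS (n : Int) : Int := (Nat.sqrt n.toNat : Int)
def pvF (n : Int) : List Int :=
  (PySem.List.pyRange 1 (pvS n + 1) 1).filter (fun b => PySem.Int.mod n b == 0)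
def pvR (n b : Int) : Int := PySem.Int.floordiv n b
def pvTb (n b : Int) : List (Int × Int) := if b != pvR n b then [(pvR n b, b)] else []
-- A's divisor enumeration: each small divisor b, followed by its cofactor when distinct
def pvDA (n : Int) : List Int :=
  (pvF n).flatMap (fun b => if b != pvR n b then [b, pvR n b] else [b])

theorem pvMemF {n b : Int} (hb : b ∈ pvF n) : 1 ≤ b ∧ b ≤ pvS n ∧ b ∣ n := by
  rcases List.mem_filter.1 hb with ⟨hr, hp⟩
  rcases (PySem.List.mem_pyRange_one).1 hr with ⟨h1, h2⟩
  refine ⟨h1, by omega, ?_⟩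
  exact (PySem.Int.mod_eq_zero_iff_dvd n b).1 (by simpa using hp)

theorem pvMemF_iff {n b : Int} : b ∈ pvF n ↔ 1 ≤ b ∧ b ≤ pvS n ∧ b ∣ n := by
  constructor
  · exact pvMemF
  · rintro ⟨h1, h2, h3⟩
    refine List.mem_filter.2 ⟨(PySem.List.mem_pyRange_one).2 ⟨h1, by omega⟩, ?_⟩
    simpa using (PySem.Int.mod_eq_zero_iff_dvd n b).2 h3

theorem pvSsq {n : Int} (hn : 0 ≤ n) : pvS n * pvS n ≤ n := by
  have := Nat.sqrt_le n.toNat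
  have h2 : ((Nat.sqrt n.toNat * Nat.sqrt n.toNat : Nat) : Int) ≤ ((n.toNat : Nat) : Int) := by
    exact_mod_cast this
  simpa [pvS, Int.toNat_of_nonneg hn] using h2

theorem pvLtSsq {n : Int} (hn : 0 ≤ n) : n < (pvS n + 1) * (pvS n + 1) := by
  have := Nat.lt_succ_sqrt n.toNat
  have h2 : ((n.toNat : Nat) : Int) < (((Nat.sqrt n.toNat + 1) * (Nat.sqrt n.toNat + 1) : Nat) : Int) := by
    exact_mod_cast this
  push_cast at h2
  simpa [pvS, Int.toNat_of_nonneg hn] using h2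

theorem pvRmul {n b : Int} (hb : b ∈ pvF n) : pvR n b * b = n := by
  obtain ⟨h1, _, hd⟩ := pvMemF hb
  unfold pvR
  rw [PySem.Int.floordiv_eq_ediv_of_pos (by omega)]
  exact Int.ediv_mul_cancel hd

theorem pvRR {n b : Int} (hn : 1 ≤ n) (hb : b ∈ pvF n) : pvR n (pvR n b) = b := by
  obtain ⟨h1, _, _⟩ := pvMemF hb
  have hr := pvRmul hb
  set r := pvR n b with hrdef
  have hrpos : 1 ≤ r := by nlinarith
  have key : PySem.Int.floordiv n r = b := by
    rw [PySem.Int.floordiv_eq_ediv_of_pos (by omega : (0:Int) < r), ← hr,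
      Int.mul_ediv_cancel_left _ (by omega : r ≠ 0)]
  exact key

theorem pvRlarge {s b rr n : Int} (h1 : 1 ≤ b) (h2 : b ≤ s) (hsq : s * s ≤ n)
    (hrb : rr * b = n) (hne : b ≠ rr) : s < rr := by
  have hs1 : 1 ≤ s := le_trans h1 h2
  have hr0 : 0 ≤ rr := by nlinarith
  rcases lt_trichotomy s rr with h | h | h
  · exact h
  all_goals exfalso
  · have hbs : b = s := le_antisymm h2 (by nlinarith)
    exact hne (by rw [hbs, h])
  · have h : rr ≤ s := le_of_lt h
    have hrr : rr = s := le_antisymm h (by nlinarith)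
    have hbs : b = s := le_antisymm h2 (by nlinarith)
    exact hne (by rw [hbs, hrr])

-- nodup of a flatMap from nodup pieces over a nodup index list with pairwise disjoint pieces
theorem pvNodup_flatMap {α β : Type} [DecidableEq β] {l : List α} {f : α → List β}
    (hl : l.Nodup) (hf : ∀ x ∈ l, (f x).Nodup)
    (hd : ∀ x ∈ l, ∀ y ∈ l, x ≠ y → ∀ v, v ∈ f x → v ∉ f y) : (l.flatMap f).Nodup := by
  induction l with
  | nil => simp
  | cons a t ih =>
    simp only [List.flatMap_cons]
    have hat : a ∉ t := (List.nodup_cons.1 hl).1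
    refine (hf a (by simp)).append
      (ih (List.nodup_cons.1 hl).2 (fun x hx => hf x (by simp [hx]))
        (fun x hx y hy => hd x (by simp [hx]) y (by simp [hy]))) ?_
    intro v hv hv'
    rcases List.mem_flatMap.1 hv' with ⟨x, hx, hvx⟩
    exact hd a (by simp) x (by simp [hx]) (fun h => hat (h ▸ hx)) v hv hvx

-- powers of an integer ≥ 2 are injective in the exponent
theorem pvPowInj {p : Int} (hp : 2 ≤ p) {i j : Nat} (h : p ^ i = p ^ j) : i = j := by
  rcases lt_trichotomy i j with hij | hij | hij
  · exact absurd h (ne_of_lt (pow_lt_pow_right₀ (by omega : (1:Int) < p) hij))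
  · exact hij
  · exact absurd h.symm (ne_of_lt (pow_lt_pow_right₀ (by omega : (1:Int) < p) hij))

-- unique representation d * p^i with p prime not dividing d
theorem pvUniqueAux {p d1 d2 : Int} {i j : Nat} (hp : Prime p) (h1 : ¬ p ∣ d1)
    (hij : i ≤ j) (heq : d1 * p ^ i = d2 * p ^ j) : d1 = d2 ∧ i = j := by
  have hpe : p ^ j = p ^ (j - i) * p ^ i := by
    rw [← pow_add]
    congr 1
    omega
  rw [hpe, ← mul_assoc] at heq
  have hcan : d1 = d2 * p ^ (j - i) :=
    mul_right_cancel₀ (pow_ne_zero i hp.ne_zero) heq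
  by_cases hij' : i = j
  · subst hij'
    simp at hcan
    exact ⟨hcan, rfl⟩
  · exfalso
    apply h1
    rw [hcan]
    exact Dvd.dvd.mul_left (dvd_pow_self p (by omega)) d2

theorem pvUnique {p d1 d2 : Int} {i j : Nat} (hp : Prime p) (h1 : ¬ p ∣ d1) (h2 : ¬ p ∣ d2)
    (heq : d1 * p ^ i = d2 * p ^ j) : d1 = d2 ∧ i = j := by
  rcases le_total i j with hij | hij
  · exact pvUniqueAux hp h1 hij heq
  · obtain ⟨h, h'⟩ := pvUniqueAux hp h2 hij heq.symm
    exact ⟨h.symm, h'.symm⟩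

-- the inner loop extracts the full power of p
theorem pvExtract_spec : ∀ (f : Nat) (m p pk : Int) (powers : List Int),
    1 ≤ m → 2 ≤ p → m.toNat ≤ f →
    ∃ (e : Nat) (m' : Int),
      pvExtract f m p pk powers =
        (m', pk * p ^ e, powers ++ (List.range e).map (fun i => pk * p ^ (i + 1))) ∧
      m = m' * p ^ e ∧ 1 ≤ m' ∧ ¬ (p ∣ m') := by
  intro f
  induction f with
  | zero => intro m p pk powers hm hp hf; omega
  | succ f ih =>
    intro m p pk powers hm hp hf
    by_cases hmod : PySem.Int.mod m p = 0
    · have hdvd : p ∣ m := (PySem.Int.mod_eq_zero_iff_dvd m p).1 hmod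
      obtain ⟨k, hk⟩ := hdvd
      have hfd : PySem.Int.floordiv m p = k := by
        rw [PySem.Int.floordiv_eq_ediv_of_pos (by omega : (0:Int) < p), hk,
          Int.mul_ediv_cancel_left _ (by omega : p ≠ 0)]
      have hk1 : 1 ≤ k := by nlinarith
      have hklt : k < m := by nlinarith
      obtain ⟨e, m', heq, hmm, hm'1, hnd⟩ :=
        ih k p (pk * p) (powers ++ [pk * p]) hk1 hp (by omega)
      refine ⟨e + 1, m', ?_, ?_, hm'1, hnd⟩
      · simp only [pvExtract, hmod, if_true, hfd, heq]
        refine Prod.ext rfl (Prod.ext ?_ ?_)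
        · show (pk * p) * p ^ e = pk * p ^ (e + 1)
          ring
        · show (powers ++ [pk * p]) ++ (List.range e).map (fun i => (pk * p) * p ^ (i + 1)) =
            powers ++ (List.range (e + 1)).map (fun i => pk * p ^ (i + 1))
          rw [List.append_assoc, List.range_succ_eq_map]
          congr 1
          simp only [List.map_cons, List.map_map, List.singleton_append]
          congr 1
          · ring
          · refine List.map_congr_left (fun i _ => ?_)
            show (pk * p) * p ^ (i + 1) = pk * p ^ (i + 1 + 1)
            ring
      · rw [hk, hmm]; ring
    · refine ⟨0, m, ?_, by simp, hm, ?_⟩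
      · simp [pvExtract, hmod]
      · intro hd
        exact hmod ((PySem.Int.mod_eq_zero_iff_dvd m p).2 hd)

-- the list of powers of p the inner loop collects (pk = 1, powers = [1] at the call site)
def pvPows (p : Int) (e : Nat) : List Int :=
  [1] ++ (List.range e).map (fun i => 1 * p ^ (i + 1))

theorem pvPowsMem {p : Int} {e : Nat} {q : Int} :
    q ∈ pvPows p e ↔ ∃ i ≤ e, q = p ^ i := by
  simp only [pvPows, List.singleton_append, List.mem_cons, List.mem_map, List.mem_range]
  constructor
  · rintro (rfl | ⟨i, hi, rfl⟩)
    · exact ⟨0, by omega, by simp⟩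
    · exact ⟨i + 1, by omega, by ring⟩
  · rintro ⟨i, hi, rfl⟩
    cases i with
    | zero => exact Or.inl (by simp)
    | succ j => exact Or.inr ⟨j, by omega, by ring⟩

theorem pvPowsNodup {p : Int} (hp : 2 ≤ p) (e : Nat) : (pvPows p e).Nodup := by
  rw [pvPows, List.singleton_append, List.nodup_cons]
  constructor
  · rintro hmem
    rcases List.mem_map.1 hmem with ⟨i, _, hi⟩
    have h1 : (1:Int) ≤ p ^ i := one_le_pow₀ (by omega)
    have h2 : p ^ (i + 1) = 1 := by simpa using hi
    have h3 : p ^ (i + 1) = p ^ i * p := pow_succ p i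
    nlinarith
  · refine List.Nodup.map ?_ (List.nodup_range)
    intro i j hij
    have := pvPowInj hp (show p ^ (i + 1) = p ^ (j + 1) by
      have h1 : (1:Int) * p ^ (i + 1) = 1 * p ^ (j + 1) := hij
      linarith)
    omega

theorem pvNewMem {p a : Int} {e : Nat} {divs : List Int} (hp : 2 ≤ p) (hpp : Prime p)
    (Hdiv : ∀ d, d ∈ divs ↔ 1 ≤ d ∧ d ∣ a) (v : Int) :
    v ∈ divs.flatMap (fun d => (pvPows p e).map (fun q => d * q)) ↔ 1 ≤ v ∧ v ∣ a * p ^ e := by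
  constructor
  · intro hv
    rcases List.mem_flatMap.1 hv with ⟨d, hd, hv⟩
    rcases List.mem_map.1 hv with ⟨q, hq, rfl⟩
    rcases pvPowsMem.1 hq with ⟨i, hie, rfl⟩
    obtain ⟨hd1, hda⟩ := (Hdiv d).1 hd
    have h1 : (1:Int) ≤ p ^ i := one_le_pow₀ (by omega)
    exact ⟨by nlinarith, mul_dvd_mul hda (pow_dvd_pow p hie)⟩
  · rintro ⟨hv1, hvd⟩
    obtain ⟨x, y, hx, hy, hxy⟩ := exists_dvd_and_dvd_of_dvd_mul hvd
    have hx0 : x ≠ 0 := by rintro rfl; simp at hxy; omega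
    have hy0 : y ≠ 0 := by rintro rfl; simp at hxy; omega
    have habs : v = |x| * |y| := by
      calc v = |v| := (abs_of_pos (by omega)).symm
      _ = |x * y| := by rw [hxy]
      _ = |x| * |y| := abs_mul x y
    have hyn : y.natAbs ∣ p.natAbs ^ e := by
      have := Int.natAbs_dvd_natAbs.2 hy
      rwa [Int.natAbs_pow] at this
    obtain ⟨j, hj, hyj⟩ := (Nat.dvd_prime_pow (Int.prime_iff_natAbs_prime.1 hpp)).1 hyn
    have hyabs : |y| = p ^ j := by
      have h1 : (y.natAbs : Int) = ((p.natAbs ^ j : Nat) : Int) := by exact_mod_cast hyj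
      rw [Int.abs_eq_natAbs, h1]
      push_cast
      rw [abs_of_nonneg (by omega : (0:Int) ≤ p)]
    refine List.mem_flatMap.2 ⟨|x|, (Hdiv _).2 ⟨?_, (abs_dvd x a).2 hx⟩, ?_⟩
    · exact Int.one_le_abs (by omega)
    · exact List.mem_map.2 ⟨p ^ j, pvPowsMem.2 ⟨j, hj, rfl⟩, by rw [← hyabs, ← habs]⟩

theorem pvNewNodup {p a : Int} {e : Nat} {divs : List Int} (hp : 2 ≤ p) (hpp : Prime p)
    (hpa : ¬ p ∣ a) (Hdiv : ∀ d, d ∈ divs ↔ 1 ≤ d ∧ d ∣ a) (Hnd : divs.Nodup) :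
    (divs.flatMap (fun d => (pvPows p e).map (fun q => d * q))).Nodup := by
  have hnpd : ∀ d ∈ divs, ¬ p ∣ d := fun d hd hpd => hpa (dvd_trans hpd ((Hdiv d).1 hd).2)
  refine pvNodup_flatMap Hnd ?_ ?_
  · intro d hd
    refine List.Nodup.map ?_ (pvPowsNodup hp e)
    exact mul_right_injective₀ (by have := ((Hdiv d).1 hd).1; omega)
  · intro d1 h1 d2 h2 hne v hv1 hv2
    rcases List.mem_map.1 hv1 with ⟨q1, hq1, hveq1⟩
    rcases List.mem_map.1 hv2 with ⟨q2, hq2, hveq2⟩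
    rcases pvPowsMem.1 hq1 with ⟨i, _, rfl⟩
    rcases pvPowsMem.1 hq2 with ⟨j, _, rfl⟩
    have heq : d1 * p ^ i = d2 * p ^ j := by rw [hveq1, hveq2]
    exact hne (pvUnique hpp (hnpd d1 h1) (hnpd d2 h2) heq).1

theorem pvPrimeP {p m : Int} (hp : 2 ≤ p) (hm : 1 ≤ m) (hpm : p ∣ m)
    (Hm : ∀ q, 2 ≤ q → q ∣ m → p ≤ q) : Prime p := by
  rw [Int.prime_iff_natAbs_prime, Nat.prime_def]
  have hcast : (p.natAbs : Int) = p := Int.natAbs_of_nonneg (by omega)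
  refine ⟨by omega, fun t ht => ?_⟩
  have htd : (t : Int) ∣ p := by
    have := Int.natCast_dvd_natCast.2 ht
    rwa [hcast] at this
  rcases Nat.lt_or_ge t 2 with h2 | h2
  · interval_cases t
    · exfalso
      have := Nat.eq_zero_of_zero_dvd ht
      omega
    · exact Or.inl rfl
  · right
    have hple : p ≤ (t : Int) := Hm t (by exact_mod_cast h2) (dvd_trans htd hpm)
    have htle : (t : Int) ≤ p := Int.le_of_dvd (by omega) htd
    omega

-- facts available at loop exit: every nontrivial divisor of m is m itself, and divides no
-- divisor of the already-extracted part a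
theorem pvExit {m p a : Int} (hm : 1 ≤ m) (hp : 2 ≤ p) (hguard : ¬ p * p ≤ m)
    (Hm : ∀ q, 2 ≤ q → q ∣ m → p ≤ q) (Ha : ∀ q : Int, Prime q → q ∣ a → q < p) :
    (∀ q, 2 ≤ q → q ∣ m → q = m) ∧ (∀ q, 2 ≤ q → q ∣ m → ¬ q ∣ a) := by
  have part1 : ∀ q, 2 ≤ q → q ∣ m → q = m := by
    intro q hq2 hqm
    obtain ⟨k, hk⟩ := hqm
    have hk1 : 1 ≤ k := by nlinarith
    rcases lt_or_ge k 2 with hk2 | hk2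
    · have : k = 1 := by omega
      rw [hk, this, mul_one]
    · exfalso
      have hkd : k ∣ m := ⟨q, by rw [hk]; ring⟩
      have h1 := Hm q hq2 ⟨k, hk⟩
      have h2 := Hm k hk2 hkd
      nlinarith
  refine ⟨part1, fun q hq2 hqm hqa => ?_⟩
  have hqeq := part1 q hq2 hqm
  subst hqeq
  have hqp : Prime q := by
    rw [Int.prime_iff_natAbs_prime, Nat.prime_def]
    have hcast : (q.natAbs : Int) = q := Int.natAbs_of_nonneg (by omega)
    refine ⟨by omega, fun t ht => ?_⟩
    have htd : (t : Int) ∣ q := by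
      have := Int.natCast_dvd_natCast.2 ht
      rwa [hcast] at this
    rcases Nat.lt_or_ge t 2 with h2 | h2
    · interval_cases t
      · exfalso
        have := Nat.eq_zero_of_zero_dvd ht
        omega
      · exact Or.inl rfl
    · right
      have := part1 t (by exact_mod_cast h2) htd
      omega
  have h1 := Ha q hqp hqa
  have h2 := Hm q hq2 dvd_rfl
  omega

-- the outer loop invariant: divisors lists exactly the divisors of the extracted part
theorem pvOuter_spec : ∀ (f : Nat) (m p a : Int) (divs : List Int),
    1 ≤ m → 2 ≤ p → 1 ≤ a → m + 2 ≤ (f : Int) + p →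
    (∀ d, d ∈ divs ↔ 1 ≤ d ∧ d ∣ a) → divs.Nodup →
    (∀ q, 2 ≤ q → q ∣ m → p ≤ q) → (∀ q : Int, Prime q → q ∣ a → q < p) →
    ∃ (m' a' : Int) (divs' : List Int),
      pvOuter f m p divs = (m', divs') ∧ 1 ≤ m' ∧ 1 ≤ a' ∧ a' * m' = a * m ∧
      (∀ d, d ∈ divs' ↔ 1 ≤ d ∧ d ∣ a') ∧ divs'.Nodup ∧
      (∀ q, 2 ≤ q → q ∣ m' → q = m') ∧ (∀ q, 2 ≤ q → q ∣ m' → ¬ q ∣ a') := by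
  intro f
  induction f with
  | zero =>
    intro m p a divs hm hp ha hfuel Hdiv Hnd Hm Ha
    have hguard : ¬ p * p ≤ m := by push_cast at hfuel; nlinarith
    obtain ⟨h1, h2⟩ := pvExit hm hp hguard Hm Ha
    exact ⟨m, a, divs, rfl, hm, ha, rfl, Hdiv, Hnd, h1, h2⟩
  | succ f ih =>
    intro m p a divs hm hp ha hfuel Hdiv Hnd Hm Ha
    by_cases hguard : p * p ≤ m
    · by_cases hmod : PySem.Int.mod m p = 0
      · have hpm : p ∣ m := (PySem.Int.mod_eq_zero_iff_dvd m p).1 hmod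
        have hpp : Prime p := pvPrimeP hp hm hpm Hm
        have hpa : ¬ p ∣ a := fun h => absurd (Ha p hpp h) (by omega)
        obtain ⟨e, m1, hext, hme, hm11, hpnd⟩ :=
          pvExtract_spec m.toNat m p 1 [1] hm hp le_rfl
        have hpows : pvExtract m.toNat m p 1 [1] =
            (m1, 1 * p ^ e, pvPows p e) := by rw [hext]; rfl
        have hstep : pvOuter (f + 1) m p divs =
            pvOuter f m1 (p + 1) (divs.flatMap fun d => (pvPows p e).map fun q => d * q) := by
          simp only [pvOuter, if_pos hguard, if_pos hmod, hpows]
        have hpe1 : (1:Int) ≤ p ^ e := one_le_pow₀ (by omega)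
        have hm1le : m1 ≤ m := by nlinarith
        have hape : 1 ≤ a * p ^ e := by nlinarith
        have Hdiv' : ∀ d, d ∈ (divs.flatMap fun d => (pvPows p e).map fun q => d * q) ↔
            1 ≤ d ∧ d ∣ a * p ^ e := pvNewMem hp hpp Hdiv
        have Hnd' := pvNewNodup (e := e) hp hpp hpa Hdiv Hnd
        have Hm' : ∀ q, 2 ≤ q → q ∣ m1 → p + 1 ≤ q := by
          intro q hq2 hq
          have hq' : q ∣ m := dvd_trans hq ⟨p ^ e, hme⟩
          have h1 := Hm q hq2 hq'
          rcases eq_or_ne q p with rfl | hne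
          · exact absurd hq hpnd
          · omega
        have Ha' : ∀ q : Int, Prime q → q ∣ a * p ^ e → q < p + 1 := by
          intro q hq hqd
          rcases (Prime.dvd_mul hq).1 hqd with h | h
          · have := Ha q hq h
            omega
          · have hqp : q ∣ p := hq.dvd_of_dvd_pow h
            rcases lt_or_ge 0 q with h0 | h0
            · have := Int.le_of_dvd (by omega) hqp
              omega
            · omega
        obtain ⟨m', a', divs', heq', hm'1, ha'1, hmul, Hd, Hn, H1, H2⟩ :=
          ih m1 (p + 1) (a * p ^ e) _ hm11 (by omega) hape
            (by push_cast at hfuel ⊢; omega) Hdiv' Hnd' Hm' Ha'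
        refine ⟨m', a', divs', by rw [hstep, heq'], hm'1, ha'1, ?_, Hd, Hn, H1, H2⟩
        rw [hmul, hme]
        ring
      · have hstep : pvOuter (f + 1) m p divs = pvOuter f m (p + 1) divs := by
          simp only [pvOuter, if_pos hguard, if_neg hmod]
        have hpm : ¬ p ∣ m := fun h => hmod ((PySem.Int.mod_eq_zero_iff_dvd m p).2 h)
        have Hm' : ∀ q, 2 ≤ q → q ∣ m → p + 1 ≤ q := by
          intro q hq2 hq
          have h1 := Hm q hq2 hq
          rcases eq_or_ne q p with rfl | hne
          · exact absurd hq hpm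
          · omega
        have Ha' : ∀ q : Int, Prime q → q ∣ a → q < p + 1 := fun q hq hqd => by
          have := Ha q hq hqd; omega
        obtain ⟨m', a', divs', heq', hm'1, ha'1, hmul, Hd, Hn, H1, H2⟩ :=
          ih m (p + 1) a divs hm (by omega) ha (by push_cast at hfuel ⊢; omega) Hdiv Hnd Hm' Ha'
        exact ⟨m', a', divs', by rw [hstep, heq'], hm'1, ha'1, hmul, Hd, Hn, H1, H2⟩
    · have hstep : pvOuter (f + 1) m p divs = (m, divs) := by
        simp only [pvOuter, if_neg hguard]
      obtain ⟨h1, h2⟩ := pvExit hm hp hguard Hm Ha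
      exact ⟨m, a, divs, hstep, hm, ha, rfl, Hdiv, Hnd, h1, h2⟩

-- B's divisor list before sorting: exactly the divisors of n, without duplicates
theorem pvB_divlist {n : Int} (hn : 1 ≤ n) :
    ∃ D : List Int,
      factor_pairs_alt n = (PySem.List.sorted D (fun d => d)).map (fun d => (d, PySem.Int.floordiv n d)) ∧
      (∀ d, d ∈ D ↔ 1 ≤ d ∧ d ∣ n) ∧ D.Nodup := by
  have hn0 : n ≠ 0 := by omega
  have Hdiv1 : ∀ d : Int, d ∈ ([1] : List Int) ↔ 1 ≤ d ∧ d ∣ 1 := by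
    intro d
    simp only [List.mem_singleton]
    constructor
    · rintro rfl
      exact ⟨le_refl 1, dvd_rfl⟩
    · rintro ⟨h1, h2⟩
      rcases Int.isUnit_iff.1 (isUnit_of_dvd_one h2) with rfl | rfl
      · rfl
      · omega
  obtain ⟨m', a', divs', heq, hm'1, ha'1, hmul, Hd, Hn, H1, H2⟩ :=
    pvOuter_spec n.toNat n 2 1 [1] hn (by omega) (by omega) (by omega)
      Hdiv1 (by simp) (fun q hq _ => hq)
      (fun q hq hqd => absurd (isUnit_of_dvd_one hqd) hq.not_unit)
  rw [one_mul] at hmul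
  by_cases hm2 : 1 < m'
  · refine ⟨divs'.flatMap fun d => ([(1:Int), m']).map fun q => d * q, ?_, ?_, ?_⟩
    · simp only [factor_pairs_alt, if_neg hn0, heq, if_pos hm2]
    · intro v
      constructor
      · intro hv
        rcases List.mem_flatMap.1 hv with ⟨d, hd, hv⟩
        obtain ⟨hd1, hda⟩ := (Hd d).1 hd
        rcases List.mem_map.1 hv with ⟨q, hq, rfl⟩
        rcases List.mem_cons.1 hq with rfl | hq
        · refine ⟨by omega, ?_⟩
          rw [mul_one, ← hmul]
          exact Dvd.dvd.mul_right hda m'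
        · rcases List.mem_singleton.1 hq with rfl
          refine ⟨by nlinarith, ?_⟩
          rw [← hmul]
          exact mul_dvd_mul hda dvd_rfl
      · rintro ⟨hv1, hvd⟩
        rw [← hmul] at hvd
        obtain ⟨x, y, hx, hy, hxy⟩ := exists_dvd_and_dvd_of_dvd_mul hvd
        have hx0 : x ≠ 0 := by rintro rfl; simp at hxy; omega
        have hy0 : y ≠ 0 := by rintro rfl; simp at hxy; omega
        have habs : v = |x| * |y| := by
          calc v = |v| := (abs_of_pos (by omega)).symm
          _ = |x * y| := by rw [hxy]
          _ = |x| * |y| := abs_mul x y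
        have hxm : |x| ∈ divs' := (Hd _).2 ⟨Int.one_le_abs (by omega), (abs_dvd x a').2 hx⟩
        rcases lt_or_ge 1 |y| with h2 | h2
        · have hym : |y| = m' := H1 |y| (by omega) ((abs_dvd y m').2 hy)
          refine List.mem_flatMap.2 ⟨|x|, hxm, List.mem_map.2 ⟨m', by simp, ?_⟩⟩
          rw [← hym, ← habs]
        · have hy1 : |y| = 1 := by
            have := Int.one_le_abs hy0
            omega
          refine List.mem_flatMap.2 ⟨|x|, hxm, List.mem_map.2 ⟨1, by simp, ?_⟩⟩
          rw [show |x| * 1 = |x| * |y| by rw [hy1], ← habs]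
    · refine pvNodup_flatMap Hn ?_ ?_
      · intro d hd
        have hd1 := ((Hd d).1 hd).1
        simp only [List.map_cons, List.map_nil, List.nodup_cons, List.mem_singleton,
          List.not_mem_nil, not_false_iff, and_true, List.nodup_nil]
        intro h
        nlinarith
      · intro d1 h1 d2 h2 hne v hv1 hv2
        have hd11 := ((Hd d1).1 h1).1
        have hd21 := ((Hd d2).1 h2).1
        have hda1 := ((Hd d1).1 h1).2
        have hda2 := ((Hd d2).1 h2).2
        have hnm : ¬ m' ∣ a' := H2 m' (by omega) dvd_rfl
        simp only [List.map_cons, List.map_nil, List.mem_cons,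
          List.not_mem_nil, or_false] at hv1 hv2
        rcases hv1 with rfl | rfl <;> rcases hv2 with h | h
        · exact hne (by linarith)
        · exact hnm (dvd_trans ⟨d2, by linarith⟩ hda1)
        · exact hnm (dvd_trans ⟨d1, by linarith⟩ hda2)
        · exact hne (mul_right_cancel₀ (by omega : m' ≠ 0) h)
  · have hm1 : m' = 1 := by omega
    subst hm1
    rw [mul_one] at hmul
    subst hmul
    exact ⟨divs', by simp only [factor_pairs_alt, if_neg hn0, heq, if_neg hm2], Hd, Hn⟩

-- A-side: membership and nodup of pvDA
theorem pvDA_mem {n : Int} (hn : 1 ≤ n) (d : Int) : d ∈ pvDA n ↔ 1 ≤ d ∧ d ∣ n := by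
  constructor
  · intro hd
    rcases List.mem_flatMap.1 hd with ⟨b, hb, hdb⟩
    obtain ⟨hb1, hbs, hbd⟩ := pvMemF hb
    have hr := pvRmul hb
    by_cases hbr : b != pvR n b
    · rw [if_pos hbr] at hdb
      rcases List.mem_cons.1 hdb with rfl | hdb
      · exact ⟨hb1, hbd⟩
      · rcases List.mem_singleton.1 hdb with rfl
        exact ⟨by nlinarith, ⟨b, hr.symm⟩⟩
    · rw [if_neg hbr] at hdb
      rcases List.mem_singleton.1 hdb with rfl
      exact ⟨hb1, hbd⟩
  · rintro ⟨hd1, hdd⟩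
    have hsq := pvSsq (by omega : (0:Int) ≤ n)
    have hlt := pvLtSsq (by omega : (0:Int) ≤ n)
    by_cases hds : d ≤ pvS n
    · have hF : d ∈ pvF n := pvMemF_iff.2 ⟨hd1, hds, hdd⟩
      refine List.mem_flatMap.2 ⟨d, hF, ?_⟩
      by_cases hc : d != pvR n d
      · rw [if_pos hc]; simp
      · rw [if_neg hc]; simp
    · push_neg at hds
      obtain ⟨c, hc⟩ := hdd
      have hc1 : 1 ≤ c := by nlinarith
      have hcs : c ≤ pvS n := by nlinarith
      have hcF : c ∈ pvF n := pvMemF_iff.2 ⟨hc1, hcs, ⟨d, by rw [hc]; ring⟩⟩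
      have hrc : pvR n c = d := by
        have h1 := pvRmul hcF
        have h2 : d * c = n := by rw [hc]
        exact mul_right_cancel₀ (by omega : c ≠ 0) (by rw [h1, h2])
      have hne : c != pvR n c := by
        rw [hrc]
        simp only [bne_iff_ne, ne_eq]
        omega
      refine List.mem_flatMap.2 ⟨c, hcF, ?_⟩
      rw [if_pos hne, hrc]
      simp

theorem pvDA_nodup {n : Int} (hn : 1 ≤ n) : (pvDA n).Nodup := by
  have hsq := pvSsq (by omega : (0:Int) ≤ n)
  have hFnd : (pvF n).Nodup := (PySem.List.nodup_pyRange_one 1 (pvS n + 1)).filter _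
  have key : ∀ b ∈ pvF n, ∀ v, v ∈ (if b != pvR n b then [b, pvR n b] else [b]) →
      v = b ∨ (v = pvR n b ∧ b ≠ pvR n b) := by
    intro b hb v hv
    by_cases hc : b != pvR n b
    · rw [if_pos hc] at hv
      rcases List.mem_cons.1 hv with rfl | hv
      · exact Or.inl rfl
      · rcases List.mem_singleton.1 hv with rfl
        exact Or.inr ⟨rfl, by simpa [bne_iff_ne] using hc⟩
    · rw [if_neg hc] at hv
      exact Or.inl (List.mem_singleton.1 hv)
  have hrbig : ∀ b ∈ pvF n, b ≠ pvR n b → pvS n < pvR n b := by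
    intro b hb hne
    obtain ⟨h1, h2, _⟩ := pvMemF hb
    exact pvRlarge h1 h2 hsq (pvRmul hb) hne
  refine pvNodup_flatMap hFnd ?_ ?_
  · intro b hb
    by_cases hc : b != pvR n b
    · rw [if_pos hc]
      simp only [List.nodup_cons, List.mem_singleton, List.not_mem_nil, not_false_iff,
        and_true, List.nodup_nil]
      simpa [bne_iff_ne] using hc
    · rw [if_neg hc]
      simp
  · intro b1 h1 b2 h2 hne v hv1 hv2
    obtain ⟨hb11, hb1s, _⟩ := pvMemF h1
    obtain ⟨hb21, hb2s, _⟩ := pvMemF h2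
    rcases key b1 h1 v hv1 with h1v | ⟨h1v, hne1⟩ <;>
      rcases key b2 h2 v hv2 with h2v | ⟨h2v, hne2⟩
    · exact hne (h1v.symm.trans h2v)
    · have hb1r : b1 = pvR n b2 := h1v.symm.trans h2v
      have := hrbig b2 h2 hne2
      omega
    · have hb2r : b2 = pvR n b1 := h2v.symm.trans h1v
      have := hrbig b1 h1 hne1
      omega
    · have heq : pvR n b1 = pvR n b2 := h1v.symm.trans h2v
      have : b1 = b2 := by
        have e1 := pvRR hn h1
        have e2 := pvRR hn h2
        rw [← e1, ← e2, heq]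
      exact hne this

-- flatMap of a guarded body is the flatMap over the filter
theorem pvFlatMap_if {α β : Type} (p : α → Bool) (h : α → List β) (l : List α) :
    l.flatMap (fun b => if p b then h b else []) = (l.filter p).flatMap h := by
  induction l with
  | nil => simp
  | cons a t ih => by_cases hp : p a <;> simp [hp, ih]

-- A's raw pair list, expressed over pvDA
theorem pvA_eq {n : Int} (hn : 1 ≤ n) :
    factor_pairs n =
      PySem.List.sorted2 ((pvDA n).map (fun d => (d, pvR n d)))
        (fun p => p.1) (fun p => p.2) := by
  unfold factor_pairs
  have hbody : (fun (pairs : List (Int × Int)) (b : Int) =>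
      if PySem.Int.mod n b = 0 then
        let r := PySem.Int.floordiv n b
        let pairs := pairs ++ [(b, r)]
        if b ≠ r then pairs ++ [(r, b)] else pairs
      else pairs) =
      fun pairs b => pairs ++
        (if PySem.Int.mod n b == 0 then (b, pvR n b) :: pvTb n b else []) := by
    funext pairs b
    simp only [pvTb, pvR, beq_iff_eq]
    by_cases hm : PySem.Int.mod n b = 0
    · by_cases hne : b = PySem.Int.floordiv n b
      · simp [hm, ← hne]
      · simp [hm, hne, List.append_assoc]
    · simp [hm]
  rw [hbody, PySem.List.foldl_append_eq_flatMap, List.nil_append,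
    pvFlatMap_if (fun b => PySem.Int.mod n b == 0) (fun b => (b, pvR n b) :: pvTb n b)]
  have hmap : (pvDA n).map (fun d => (d, pvR n d)) =
      (pvF n).flatMap (fun b => (b, pvR n b) :: pvTb n b) := by
    rw [pvDA, List.map_flatMap]
    refine List.flatMap_congr (fun b hb => ?_)
    by_cases hbr : b != pvR n b
    · rw [if_pos hbr]
      have hRR := pvRR hn hb
      simp [pvTb, hbr, hRR]
    · rw [if_neg hbr]
      simp [pvTb, hbr]
  rw [hmap]
  rfl

-- sorted2 over fst-injective pairs is sorted by fst
theorem pvInsertBy_congr {α : Type} (p q : α → α → Bool) (x : α) (acc : List α)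
    (h : ∀ y ∈ acc, p x y = q x y) :
    PySem.List.insertBy p x acc = PySem.List.insertBy q x acc := by
  induction acc with
  | nil => rfl
  | cons y ys ih =>
    simp only [PySem.List.insertBy, h y (by simp)]
    by_cases hq : q x y = true
    · simp [hq]
    · simp only [hq]
      have := ih (fun z hz => h z (by simp [hz]))
      simp [this]

theorem pvFoldl_insertBy_congr {α : Type} (p q : α → α → Bool) (l : List α)
    (h : ∀ a ∈ l, ∀ b ∈ l, p a b = q a b) :
    l.foldl (fun acc x => PySem.List.insertBy p x acc) [] =
      l.foldl (fun acc x => PySem.List.insertBy q x acc) [] := by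
  have key : ∀ (l acc : List α),
      (∀ a b : α, (a ∈ l ∨ a ∈ acc) → (b ∈ l ∨ b ∈ acc) → p a b = q a b) →
      l.foldl (fun acc x => PySem.List.insertBy p x acc) acc =
        l.foldl (fun acc x => PySem.List.insertBy q x acc) acc := by
    intro l
    induction l with
    | nil => intro acc _; rfl
    | cons a t ih =>
      intro acc hacc
      simp only [List.foldl_cons]
      rw [pvInsertBy_congr p q a acc (fun y hy => hacc a y (Or.inl (by simp)) (Or.inr hy))]
      refine ih _ (fun x y hx hy => hacc x y ?_ ?_)
      · rcases hx with hx | hx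
        · exact Or.inl (by simp [hx])
        · rcases (PySem.List.mem_insertBy q a x acc).1 hx with rfl | h1
          · exact Or.inl (by simp)
          · exact Or.inr h1
      · rcases hy with hy | hy
        · exact Or.inl (by simp [hy])
        · rcases (PySem.List.mem_insertBy q a y acc).1 hy with rfl | h1
          · exact Or.inl (by simp)
          · exact Or.inr h1
  exact key l [] (by intro a b ha hb; simp only [List.not_mem_nil, or_false] at ha hb; exact h a ha b hb)

-- ===== VERDICT (by name: the statement is the Claim_ definition above) =====
theorem factor_pairs_spec : Claim_equal_factor_pairs := by
  intro n _ hpre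
  unfold Spec_factor_pairs
  by_cases hn0 : n = 0
  · subst hn0
    decide
  have hn : 1 ≤ n := by
    have h0 : (0:Int) ≤ n := hpre
    omega
  obtain ⟨D, hBeq, hDmem, hDnd⟩ := pvB_divlist hn
  rw [hBeq, pvA_eq hn]
  have hSp : (PySem.List.sorted D (fun d => d)).Perm D := PySem.List.sorted_perm D _ _
  have hperm : D.Perm (pvDA n) :=
    (List.perm_ext_iff_of_nodup hDnd (pvDA_nodup hn)).2
      (fun d => by rw [hDmem d, pvDA_mem hn d])
  have hSDperm : (PySem.List.sorted D (fun d => d)).Perm (pvDA n) := hSp.trans hperm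
  have hSDnd : (PySem.List.sorted D (fun d => d)).Nodup := (hSp.nodup_iff).2 hDnd
  have hle : (PySem.List.sorted D (fun d => d)).Pairwise (fun a b => a ≤ b) :=
    PySem.List.sorted_pairwise D (fun d => d)
  have hlt : (PySem.List.sorted D (fun d => d)).Pairwise (fun a b => a < b) := by
    have := hle.and hSDnd
    exact this.imp (fun h => lt_of_le_of_ne h.1 h.2)
  have hpwB : ((PySem.List.sorted D (fun d => d)).map
      (fun d => (d, PySem.Int.floordiv n d))).Pairwise (fun a b => a.1 < b.1) :=
    List.pairwise_map.2 (hlt.imp (fun h => by simpa using h))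
  have hpermB : ((PySem.List.sorted D (fun d => d)).map
        (fun d => (d, PySem.Int.floordiv n d))).Perm
      ((pvDA n).map (fun d => (d, pvR n d))) := hSDperm.map _
  set PAIRS := (pvDA n).map (fun d => (d, pvR n d)) with hP
  have hinj : ∀ a ∈ PAIRS, ∀ b ∈ PAIRS, a.1 = b.1 → a = b := by
    intro a ha b hb h1
    rcases List.mem_map.1 ha with ⟨d1, _, rfl⟩
    rcases List.mem_map.1 hb with ⟨d2, _, rfl⟩
    simp only at h1
    rw [h1]
  have hcong : PySem.List.sorted2 PAIRS (fun p => p.1) (fun p => p.2) =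
      PySem.List.sorted PAIRS (fun p => p.1) := by
    rw [PySem.List.sorted_eq_foldl_insertBy]
    show PAIRS.foldl (fun acc x => PySem.List.insertBy _ x acc) [] = _
    refine pvFoldl_insertBy_congr _ _ PAIRS ?_
    intro a ha b hb
    rcases lt_trichotomy a.1 b.1 with h | h | h
    · simp [h, not_lt_of_gt h]
    · have := hinj a ha b hb h
      subst this
      simp
    · simp [h, not_lt_of_gt h]
  rw [hcong]
  exact PySem.List.sorted_eq_of_perm_of_pairwise_lt PAIRS _ (fun p => p.1) hpermB hpwB
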